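-- pv_equiv track=rewrite | github.com/jjcmoon/DeepSoftLog | deepsoftlog/experiments/fsm/generate_data.py | language_10star
-- ===== SOURCE A (Python) =====
-- def language_10star(n):
--     """ Language for (10)* """
--     digits = 2
--     data = [""]
--     for _ in range(n):
--         s = data[-1]
--         for pi in range(0, digits):
--             s = str(pi) + s
--         data.append(s)
--     return data
-- ===== SOURCE B (Python) =====
-- def language_10star(n):
--     """ Language for (10)* """
--     return [""] + ["10" * i for i in range(1, n + 1)]
-- ===== Notes on version B (the rewrite author's own statement) =====
-- stated objective: simpler
-- what changed: B computes each entry independently as the closed form '10'*i in a comprehension over range(1, n+1), replacing A's accumulator that rebuilds each string by prepending digits onto the previous list element.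
import Mathlib
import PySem

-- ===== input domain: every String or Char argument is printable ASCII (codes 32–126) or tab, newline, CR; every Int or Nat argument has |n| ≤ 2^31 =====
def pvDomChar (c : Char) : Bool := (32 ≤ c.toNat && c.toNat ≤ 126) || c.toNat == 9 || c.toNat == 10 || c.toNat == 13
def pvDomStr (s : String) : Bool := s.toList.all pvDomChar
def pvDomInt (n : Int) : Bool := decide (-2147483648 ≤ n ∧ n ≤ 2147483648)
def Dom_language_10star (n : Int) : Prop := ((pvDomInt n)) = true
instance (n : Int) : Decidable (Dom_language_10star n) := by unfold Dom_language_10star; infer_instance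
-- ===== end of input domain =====

-- B replaces A's "prepend digits onto the previous element" accumulator loop by computing
-- each entry independently as the closed form "10"*i (objective: simpler).

-- ===== PORT A =====
def language_10star (n : Int) : List String :=
  let digits : Int := 2
  let data : List String := [""]
  (PySem.List.pyRange 0 n 1).foldl
    (fun data _ =>
      let s := PySem.List.pyGetD data (-1) ""
      let s := (PySem.List.pyRange 0 digits 1).foldl
        (fun s pi => PySem.Int.toStr pi ++ s) s
      data ++ [s]) data

-- ===== PORT B =====
def language_10star_alt (n : Int) : List String :=
  [""] ++ (PySem.List.pyRange 1 (n + 1) 1).map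
    (fun i => String.ofList (PySem.List.pyRepeat "10".toList i))

-- ===== PRECONDITION & SPEC =====
def Spec_language_10star (n : Int) (out : List String) : Prop := out = language_10star_alt n
instance (n : Int) (out : List String) : Decidable (Spec_language_10star n out) := by unfold Spec_language_10star; infer_instance

-- ===== CLAIM (what is proved, stated in full; the proofs are below) =====
def Claim_equal_language_10star : Prop := ∀ (n : Int), Dom_language_10star n → Spec_language_10star n (language_10star n)

-- ===== LEMMAS AND PROOFS =====

-- the closed-form entry
def pvG (i : Int) : String := String.ofList (PySem.List.pyRepeat "10".toList i)

lemma pvG_step (m : Int) (h : 0 ≤ m) :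
    PySem.Int.toStr 1 ++ (PySem.Int.toStr 0 ++ pvG m) = pvG (m + 1) := by
  have h1 : (m + 1).toNat = m.toNat + 1 := by omega
  have e1 : PySem.Int.toChars 1 = ['1'] := by decide
  have e0 : PySem.Int.toChars 0 = ['0'] := by decide
  apply String.ext
  simp [pvG, PySem.List.pyRepeat, h1, List.replicate_succ, e1, e0]

-- A's loop produces exactly the closed-form entries for indices 0..m
lemma pvA_loop (m : Nat) :
    language_10star (m : Int) = (List.range (m + 1)).map (fun k : Nat => pvG (k : Int)) := by
  induction m with
  | zero =>
    simp [language_10star, PySem.List.pyRange_one_eq_nil, List.range_succ]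
    apply String.ext
    simp [pvG, PySem.List.pyRepeat]
  | succ m ih =>
    have hsplit : PySem.List.pyRange 0 ((m : Int) + 1) 1
        = PySem.List.pyRange 0 (m : Int) 1 ++ [(m : Int)] :=
      PySem.List.pyRange_one_succ_right (by positivity)
    have hprev : (List.range (m + 1)).map (fun k : Nat => pvG (k : Int))
        = (List.range m).map (fun k : Nat => pvG (k : Int)) ++ [pvG (m : Int)] := by
      simp [List.range_succ]
    simp only [language_10star, Int.natCast_add, Int.natCast_one, hsplit,
      List.foldl_append] at *
    rw [ih, hprev, List.foldl_cons, List.foldl_nil,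
      PySem.List.pyGetD_neg_one_append_singleton]
    have h2 : PySem.List.pyRange 0 2 1 = [0, 1] := by decide
    rw [h2, List.foldl_cons, List.foldl_cons, List.foldl_nil, pvG_step (m : Int) (by positivity)]
    simp [List.range_succ]

-- B equals the same closed-form list for nonnegative n
lemma pvB_eq (m : Nat) :
    language_10star_alt (m : Int) = (List.range (m + 1)).map (fun k : Nat => pvG (k : Int)) := by
  unfold language_10star_alt
  rw [PySem.List.pyRange_one]
  have hlen : ((m : Int) + 1 - 1).toNat = m := by omega
  rw [hlen, List.range_succ_eq_map, List.map_cons, List.map_map, List.map_map,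
    List.singleton_append]
  congr 1
  apply List.map_congr_left
  intro k _
  simp only [Function.comp_apply, pvG]
  congr 2
  omega

-- ===== VERDICT (by name: the statement is the Claim_ definition above) =====
theorem language_10star_spec : Claim_equal_language_10star := by
  intro n _
  unfold Spec_language_10star
  rcases (by omega : 0 ≤ n ∨ n < 0) with hn | hn
  · obtain ⟨m, rfl⟩ := Int.eq_ofNat_of_zero_le hn
    rw [pvA_loop, pvB_eq]
  · have hA : PySem.List.pyRange 0 n 1 = [] := PySem.List.pyRange_one_eq_nil (by omega)
    have hB : PySem.List.pyRange 1 (n + 1) 1 = [] := PySem.List.pyRange_one_eq_nil (by omega)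
    simp [language_10star, language_10star_alt, hA, hB]
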